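-- pv_equiv track=rewrite | github.com/pypi-data/pypi-mirror-185 | packages/bodo/bodo-2023.14rc1-cp38-cp38-macosx_10_15_x86_64.whl/bodo/libs/bodosql_regexp_array_kernels.py | posix_to_re
-- ===== SOURCE A (Python) =====
-- def posix_to_re(pattern):
--     oqd__xgiy = {'[:alnum:]': 'A-Za-z0-9', '[:alpha:]': 'A-Za-z',
--         '[:ascii:]': '\x01-\x7f', '[:blank:]': ' \t', '[:cntrl:]':
--         '\x01-\x1f\x7f', '[:digit:]': '0-9', '[:graph:]': '!-~',
--         '[:lower:]': 'a-z', '[:print:]': ' -~', '[:punct:]':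
--         '\\]\\[!"#$%&\'()*+,./:;<=>?@\\^_`{|}~-', '[:space:]':
--         ' \t\r\n\x0b\x0c', '[:upper:]': 'A-Z', '[:word:]': 'A-Za-z0-9_',
--         '[:xdigit:]': 'A-Fa-f0-9'}
--     for hkwpr__dyc in oqd__xgiy:
--         pattern = pattern.replace(hkwpr__dyc, oqd__xgiy[hkwpr__dyc])
--     return pattern
-- ===== SOURCE B (Python) =====
-- def posix_to_re(pattern):
--     table = (('[:alnum:]', 'A-Za-z0-9'), ('[:alpha:]', 'A-Za-z'),
--         ('[:ascii:]', '\x01-\x7f'), ('[:blank:]', ' \t'),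
--         ('[:cntrl:]', '\x01-\x1f\x7f'), ('[:digit:]', '0-9'),
--         ('[:graph:]', '!-~'), ('[:lower:]', 'a-z'), ('[:print:]', ' -~'),
--         ('[:punct:]', '\\]\\[!"#$%&\'()*+,./:;<=>?@\\^_`{|}~-'),
--         ('[:space:]', ' \t\r\n\x0b\x0c'), ('[:upper:]', 'A-Z'),
--         ('[:word:]', 'A-Za-z0-9_'), ('[:xdigit:]', 'A-Fa-f0-9'))
--     out = []
--     i = 0
--     n = len(pattern)
--     while i < n:
--         for key, val in table:
--             if pattern.startswith(key, i):
--                 out.append(val)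
--                 i += len(key)
--                 break
--         else:
--             out.append(pattern[i])
--             i += 1
--     return ''.join(out)
-- ===== Notes on version B (the rewrite author's own statement) =====
-- stated objective: alternative
-- what changed: A runs 14 sequential full str.replace passes over the pattern (one per POSIX class); B makes a single left-to-right scan that at each position substitutes the first table token matching there, building the output once. Asymptotically both are linear; A's passes run in C so B is not faster in CPython.
import Mathlib
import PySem

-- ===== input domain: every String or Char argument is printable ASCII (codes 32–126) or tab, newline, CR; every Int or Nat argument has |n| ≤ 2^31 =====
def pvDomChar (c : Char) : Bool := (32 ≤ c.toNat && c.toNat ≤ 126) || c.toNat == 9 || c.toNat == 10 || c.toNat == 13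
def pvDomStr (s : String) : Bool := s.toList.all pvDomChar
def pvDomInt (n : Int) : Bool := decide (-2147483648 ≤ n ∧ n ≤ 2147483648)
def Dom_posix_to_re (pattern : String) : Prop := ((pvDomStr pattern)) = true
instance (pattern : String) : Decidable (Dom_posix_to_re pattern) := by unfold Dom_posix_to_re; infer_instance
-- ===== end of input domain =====

-- B replaces A's 14 sequential str.replace passes by ONE left-to-right scan that substitutes
-- the first table token matching at each position (alternative algorithm; equal output proved below).

-- ===== PORT A =====
-- A's dict literal, ported as an association list of its items in insertion order; the keys are
-- distinct, so Python's 'for k in d: pattern = pattern.replace(k, d[k])' visits exactly these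
-- (key, value) pairs in this order.
def pvPosixTable : List (String × String) :=
  [("[:alnum:]", "A-Za-z0-9"), ("[:alpha:]", "A-Za-z"),
   ("[:ascii:]", "\x01-\x7f"), ("[:blank:]", " \t"),
   ("[:cntrl:]", "\x01-\x1f\x7f"), ("[:digit:]", "0-9"),
   ("[:graph:]", "!-~"), ("[:lower:]", "a-z"), ("[:print:]", " -~"),
   ("[:punct:]", "\\]\\[!\"#$%&'()*+,./:;<=>?@\\^_`{|}~-"),
   ("[:space:]", " \t\r\n\x0b\x0c"), ("[:upper:]", "A-Z"),
   ("[:word:]", "A-Za-z0-9_"), ("[:xdigit:]", "A-Fa-f0-9")]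

def posix_to_re (pattern : String) : String :=
  pvPosixTable.foldl (fun p kv => PySem.Str.replace p kv.1 kv.2) pattern

-- ===== PORT B =====
-- Source B's own table literal, at the character-list level (B scans code points)
def pvPosixTableL : List (List Char × List Char) :=
  [("[:alnum:]".toList, "A-Za-z0-9".toList), ("[:alpha:]".toList, "A-Za-z".toList),
   ("[:ascii:]".toList, "\x01-\x7f".toList), ("[:blank:]".toList, " \t".toList),
   ("[:cntrl:]".toList, "\x01-\x1f\x7f".toList), ("[:digit:]".toList, "0-9".toList),
   ("[:graph:]".toList, "!-~".toList), ("[:lower:]".toList, "a-z".toList),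
   ("[:print:]".toList, " -~".toList),
   ("[:punct:]".toList, "\\]\\[!\"#$%&'()*+,./:;<=>?@\\^_`{|}~-".toList),
   ("[:space:]".toList, " \t\r\n\x0b\x0c".toList), ("[:upper:]".toList, "A-Z".toList),
   ("[:word:]".toList, "A-Za-z0-9_".toList), ("[:xdigit:]".toList, "A-Fa-f0-9".toList)]

-- keys are nonempty: needed for termination of the scan
theorem pvPosixTableL_key_pos : ∀ kv ∈ pvPosixTableL, 0 < kv.1.length := by decide

-- Source B's while loop over positions: at each position try the table entries in order
-- (the for…break is find?); on a hit emit the value and jump past the key, otherwise emit the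
-- character and move on; ''.join(out) is the final String.ofList below.
def pvScan : List Char → List Char
  | [] => []
  | c :: t =>
    match h : pvPosixTableL.find? (fun kv => kv.1.isPrefixOf (c :: t)) with
    | some kv => kv.2 ++ pvScan ((c :: t).drop kv.1.length)
    | none => c :: pvScan t
termination_by cs => cs.length
decreasing_by
  · have hk := pvPosixTableL_key_pos _ (List.mem_of_find?_eq_some h)
    simp only [List.length_drop, List.length_cons]
    omega
  · simp

def posix_to_re_alt (pattern : String) : String :=
  String.ofList (pvScan pattern.toList)

-- ===== PRECONDITION & SPEC =====
def Spec_posix_to_re (pattern : String) (out : String) : Prop := out = posix_to_re_alt pattern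
instance (pattern : String) (out : String) : Decidable (Spec_posix_to_re pattern out) := by unfold Spec_posix_to_re; infer_instance

-- ===== CLAIM (what is proved, stated in full; the proofs are below) =====
def Claim_equal_posix_to_re : Prop := ∀ (pattern : String), Dom_posix_to_re pattern → Spec_posix_to_re pattern (posix_to_re pattern)

-- ===== LEMMAS AND PROOFS =====

-- one replace pass, at the character level (the step of A's fold)
def pvRep (s : List Char) (kv : List Char × List Char) : List Char :=
  PySem.Chars.replace s kv.1 kv.2

-- all 14 passes of A, at the character level
def pvLF (cs : List Char) : List Char := pvPosixTableL.foldl pvRep cs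

def pvKeys : List (List Char) := pvPosixTableL.map (·.1)

-- 'old' never matches starting at or strictly inside p, whatever follows p
def pvSep (p old : List Char) : Prop :=
  ∀ j, j < p.length → ¬ old <+: p.drop j ∧ ¬ p.drop j <+: old

-- executable form of pvSep, so the table facts below are provable by decide
def pvSepB (p old : List Char) : Bool :=
  (List.range p.length).all (fun j => !(old.isPrefixOf (p.drop j)) && !((p.drop j).isPrefixOf old))

theorem pvSep_of_B (p old : List Char) (h : pvSepB p old = true) : pvSep p old := by
  intro j hj
  have := List.all_eq_true.mp h j (List.mem_range.mpr hj)
  simp only [Bool.and_eq_true, Bool.not_eq_true', Bool.eq_false_iff, Ne,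
    List.isPrefixOf_iff_prefix] at this
  simpa using this

-- ---- facts about PySem.Chars.replace's fuel/accumulator loop ----

theorem pv_go_cons (old new : List Char) (f : Nat) (c : Char) (l acc : List Char) :
    PySem.Chars.replace.go old new (f + 1) (c :: l) acc
      = if old.isPrefixOf (c :: l) = true
          then PySem.Chars.replace.go old new f (List.drop old.length (c :: l)) (new.reverse ++ acc)
          else PySem.Chars.replace.go old new f l (c :: acc) := by
  rw [PySem.Chars.replace.go.eq_def]

theorem pv_go_acc (old new : List Char) :
    ∀ fuel l acc, PySem.Chars.replace.go old new fuel l acc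
      = acc.reverse ++ PySem.Chars.replace.go old new fuel l [] := by
  intro fuel
  induction fuel with
  | zero => intro l acc; rw [PySem.Chars.replace.go.eq_def, PySem.Chars.replace.go.eq_def]; simp
  | succ f ih =>
    intro l acc
    cases l with
    | nil => rw [PySem.Chars.replace.go.eq_def, PySem.Chars.replace.go.eq_def]; simp
    | cons c t =>
      rw [pv_go_cons, pv_go_cons]
      split_ifs with hpre
      · rw [ih _ (new.reverse ++ acc), ih _ (new.reverse ++ ([] : List Char))]
        simp
      · rw [ih _ (c :: acc), ih _ (c :: ([] : List Char))]
        simp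

theorem pv_go_fuel (old new : List Char) (hold : old ≠ []) :
    ∀ fuel fuel' l acc, l.length ≤ fuel → l.length ≤ fuel' →
      PySem.Chars.replace.go old new fuel l acc = PySem.Chars.replace.go old new fuel' l acc := by
  intro fuel
  induction fuel with
  | zero =>
    intro fuel' l acc h1 h2
    have : l = [] := by cases l <;> simp_all
    subst this
    cases fuel' <;>
      (rw [PySem.Chars.replace.go.eq_def]; (try conv_rhs => rw [PySem.Chars.replace.go.eq_def]); try simp)
  | succ f ih =>
    intro fuel' l acc h1 h2
    cases l with
    | nil =>
      cases fuel' <;>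
        (rw [PySem.Chars.replace.go.eq_def]; (try conv_rhs => rw [PySem.Chars.replace.go.eq_def]); try simp)
    | cons c t =>
      cases fuel' with
      | zero => simp at h2
      | succ f' =>
        rw [pv_go_cons, pv_go_cons]
        split_ifs with hpre
        · apply ih
          · have : 1 ≤ old.length := by cases old <;> simp_all
            simp only [List.length_drop, List.length_cons] at *
            omega
          · have : 1 ≤ old.length := by cases old <;> simp_all
            simp only [List.length_drop, List.length_cons] at *
            omega
        · apply ih <;> simp_all

-- ---- the three shapes a replace pass takes at the front of the string ----

theorem pv_replace_nil (old new : List Char) (hold : old ≠ []) :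
    PySem.Chars.replace [] old new = [] := by
  unfold PySem.Chars.replace
  rw [List.isEmpty_eq_false_iff.mpr hold]
  simp only [List.length_nil]
  rw [PySem.Chars.replace.go.eq_def]
  simp

theorem pv_replace_cons (old new : List Char) (hold : old ≠ []) (c : Char) (t : List Char)
    (h : ¬ old <+: (c :: t)) :
    PySem.Chars.replace (c :: t) old new = c :: PySem.Chars.replace t old new := by
  unfold PySem.Chars.replace
  rw [List.isEmpty_eq_false_iff.mpr hold]
  have hb : old.isPrefixOf (c :: t) = false := by
    rw [Bool.eq_false_iff]
    intro hc
    exact h (List.isPrefixOf_iff_prefix.mp hc)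
  rw [List.length_cons, pv_go_cons, hb]
  simp only [Bool.false_eq_true, if_false]
  rw [pv_go_acc old new t.length t [c]]
  simp

theorem pv_replace_prefix (old new t : List Char) (hold : old ≠ []) :
    PySem.Chars.replace (old ++ t) old new = new ++ PySem.Chars.replace t old new := by
  obtain ⟨o, os, rfl⟩ : ∃ o os, old = o :: os := by
    cases old with
    | nil => exact absurd rfl hold
    | cons o os => exact ⟨o, os, rfl⟩
  unfold PySem.Chars.replace
  rw [List.isEmpty_eq_false_iff.mpr hold]
  have hlen : (o :: os ++ t).length = (os.length + t.length) + 1 := by simp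
  have hb : (o :: os).isPrefixOf (o :: os ++ t) = true :=
    List.isPrefixOf_iff_prefix.mpr (List.prefix_append _ _)
  rw [hlen, List.cons_append, pv_go_cons, ← List.cons_append, hb]
  simp only [if_true, List.drop_left]
  rw [pv_go_acc (o :: os) new (os.length + t.length) t (new.reverse ++ [])]
  rw [pv_go_fuel _ _ hold (os.length + t.length) t.length t [] (by omega) (by omega)]
  simp

-- ---- separation: a replace pass distributes over an inert prefix ----

theorem pv_hom (old new p x : List Char) (hold : old ≠ []) (hsep : pvSep p old) :
    PySem.Chars.replace (p ++ x) old new = p ++ PySem.Chars.replace x old new := by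
  induction p generalizing x with
  | nil => simp
  | cons c p' ih =>
    have h0 := hsep 0 (by simp)
    simp only [List.drop_zero] at h0
    have hnp : ¬ old <+: (c :: p') ++ x := by
      intro hpre
      rcases List.prefix_or_prefix_of_prefix hpre (List.prefix_append (c :: p') x) with h | h
      · exact h0.1 h
      · exact h0.2 h
    rw [List.cons_append, pv_replace_cons old new hold _ _ (by rw [← List.cons_append]; exact hnp)]
    rw [ih x (fun j hj => by
      have := hsep (j + 1) (by simp only [List.length_cons]; omega)
      simpa [List.drop_succ_cons] using this)]
    simp

theorem pv_chain (ps : List (List Char × List Char)) (p : List Char)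
    (h : ∀ kv ∈ ps, kv.1 ≠ [] ∧ pvSep p kv.1) :
    ∀ x, ps.foldl pvRep (p ++ x) = p ++ ps.foldl pvRep x := by
  induction ps with
  | nil => intro x; simp
  | cons kv ps ih =>
    intro x
    obtain ⟨h1, h2⟩ := h kv (List.mem_cons_self ..)
    simp only [List.foldl_cons, pvRep]
    rw [pv_hom kv.1 kv.2 p x h1 h2]
    exact ih (fun kv hkv => h kv (List.mem_cons_of_mem _ hkv)) _

-- ---- a replace pass never creates a new key occurrence ----

theorem pv_noCreate (old new : List Char) (S : List Char → Prop)
    (hStail : ∀ e u, S (e :: u) → S u)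
    (hnew : ∀ u, S u → u ≠ [] → ¬ u <+: new ∧ ¬ new <+: u)
    (hold : old ≠ []) :
    ∀ y u, S u → u <+: PySem.Chars.replace y old new → u <+: y := by
  have main : ∀ n y, y.length ≤ n → ∀ u, S u → u <+: PySem.Chars.replace y old new → u <+: y := by
    intro n
    induction n with
    | zero =>
      intro y hy u _ hu
      have : y = [] := by cases y <;> simp_all
      subst this
      rw [pv_replace_nil old new hold] at hu
      simpa using hu
    | succ n ih =>
      intro y hy u hS hu
      by_cases hp : old <+: y
      · obtain ⟨y2, rfl⟩ := hp
        rw [pv_replace_prefix old new y2 hold] at hu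
        cases u with
        | nil => exact List.nil_prefix
        | cons e u2 =>
          rcases List.prefix_or_prefix_of_prefix hu (List.prefix_append new _) with h | h
          · exact absurd h (hnew _ hS (by simp)).1
          · exact absurd h (hnew _ hS (by simp)).2
      · cases y with
        | nil =>
          rw [pv_replace_nil old new hold] at hu
          simpa using hu
        | cons d y2 =>
          rw [pv_replace_cons old new hold d y2 hp] at hu
          cases u with
          | nil => exact List.nil_prefix
          | cons e u2 =>
            obtain ⟨rfl, hu2⟩ := List.cons_prefix_cons.mp hu
            have : u2 <+: y2 := ih y2 (by simp at hy; omega) u2 (hStail _ _ hS) hu2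
            exact List.cons_prefix_cons.mpr ⟨rfl, this⟩
  intro y
  exact main y.length y (le_refl _)

-- ---- decidable facts about the concrete table ----

theorem pv_tbl_ne : ∀ kv ∈ pvPosixTableL, kv.1 ≠ [] ∧ kv.2 ≠ [] := by decide

theorem pv_tbl_keys_sep : ∀ k ∈ pvKeys, ∀ k' ∈ pvKeys, k ≠ k' → pvSepB k k' = true := by decide

theorem pv_tbl_vals_sep : ∀ kv ∈ pvPosixTableL, ∀ k ∈ pvKeys, pvSepB kv.2 k = true := by decide

theorem pv_tbl_suffix_val : ∀ k ∈ pvKeys, ∀ u ∈ k.tails, u ≠ [] →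
    ∀ kv ∈ pvPosixTableL, ¬ u <+: kv.2 ∧ ¬ kv.2 <+: u := by decide

theorem pv_tbl_nodup : pvKeys.Nodup := by decide

-- the suffix-of-a-key predicate fed to pv_noCreate
def pvKeySuf (u : List Char) : Prop := ∃ k ∈ pvKeys, u <:+ k

theorem pvKeySuf_tail : ∀ e u, pvKeySuf (e :: u) → pvKeySuf u := by
  rintro e u ⟨k, hk, hs⟩
  exact ⟨k, hk, (List.suffix_cons e u).trans hs⟩

theorem pvKeySuf_val (kv : List Char × List Char) (hkv : kv ∈ pvPosixTableL) :
    ∀ u, pvKeySuf u → u ≠ [] → ¬ u <+: kv.2 ∧ ¬ kv.2 <+: u := by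
  rintro u ⟨k, hk, hs⟩ hne
  exact pv_tbl_suffix_val k hk u ((List.mem_tails ..).mpr hs) hne kv hkv

-- a pass by any table pair never creates a key occurrence at the front
theorem pv_noCreate_tbl (kv : List Char × List Char) (hkv : kv ∈ pvPosixTableL)
    (y k : List Char) (hk : k ∈ pvKeys) (h : k <+: pvRep y kv) : k <+: y :=
  pv_noCreate kv.1 kv.2 pvKeySuf pvKeySuf_tail (pvKeySuf_val kv hkv)
    (pv_tbl_ne kv hkv).1 y k ⟨k, hk, List.suffix_refl k⟩ h

-- when no key matches at the front, all 14 passes leave the first character alone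
theorem pv_chainNone (c : Char) :
    ∀ (ps : List (List Char × List Char)), (∀ kv ∈ ps, kv ∈ pvPosixTableL) →
      ∀ t, (∀ k ∈ pvKeys, ¬ k <+: c :: t) →
        ps.foldl pvRep (c :: t) = c :: ps.foldl pvRep t := by
  intro ps
  induction ps with
  | nil => intro _ t _; simp
  | cons kv ps ih =>
    intro hmem t hnone
    have hkv := hmem kv (List.mem_cons_self ..)
    have hk1 : kv.1 ∈ pvKeys := List.mem_map.mpr ⟨kv, hkv, rfl⟩
    have hstep : pvRep (c :: t) kv = c :: pvRep t kv :=
      pv_replace_cons kv.1 kv.2 (pv_tbl_ne kv hkv).1 c t (hnone kv.1 hk1)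
    simp only [List.foldl_cons, hstep]
    apply ih (fun kv' h => hmem kv' (List.mem_cons_of_mem _ h))
    intro k hk hpre
    have : k <+: c :: t := by
      apply pv_noCreate_tbl kv hkv (c :: t) k hk
      rw [hstep]
      exact hpre
    exact hnone k hk this

-- ---- equation lemmas for the scan ----

theorem pvScan_nil : pvScan [] = [] := by rw [pvScan]

theorem pvScan_cons_some (c : Char) (t : List Char) (kv : List Char × List Char)
    (h : pvPosixTableL.find? (fun kv => kv.1.isPrefixOf (c :: t)) = some kv) :
    pvScan (c :: t) = kv.2 ++ pvScan ((c :: t).drop kv.1.length) := by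
  rw [pvScan]
  split <;> simp_all

theorem pvScan_cons_none (c : Char) (t : List Char)
    (h : pvPosixTableL.find? (fun kv => kv.1.isPrefixOf (c :: t)) = none) :
    pvScan (c :: t) = c :: pvScan t := by
  rw [pvScan]
  split <;> simp_all

-- ---- the main equivalence at the character level ----

theorem pv_main : ∀ cs, pvLF cs = pvScan cs := by
  have hLFnil : pvLF [] = [] := by decide
  have main : ∀ n cs, cs.length ≤ n → pvLF cs = pvScan cs := by
    intro n
    induction n with
    | zero =>
      intro cs hcs
      have : cs = [] := by cases cs <;> simp_all
      subst this
      rw [pvScan_nil, hLFnil]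
    | succ n ih =>
      intro cs hcs
      cases cs with
      | nil => rw [pvScan_nil, hLFnil]
      | cons c t =>
        cases hfi : pvPosixTableL.find? (fun kv => kv.1.isPrefixOf (c :: t)) with
        | some kv =>
          rw [pvScan_cons_some c t kv hfi]
          have hmem := List.mem_of_find?_eq_some hfi
          have hk1 : kv.1 ∈ pvKeys := List.mem_map.mpr ⟨kv, hmem, rfl⟩
          have hpreb := List.find?_some hfi
          simp only [List.isPrefixOf_iff_prefix] at hpreb
          obtain ⟨t', ht⟩ := hpreb
          obtain ⟨prel, post, htbl⟩ := List.append_of_mem hmem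
          have hkeys : pvKeys = prel.map (·.1) ++ kv.1 :: post.map (·.1) := by
            rw [pvKeys, htbl]; simp
          have hnd := pv_tbl_nodup
          rw [hkeys] at hnd
          have hnotin : kv.1 ∉ prel.map (·.1) := fun hmem' =>
            (List.nodup_append.mp hnd).2.2 kv.1 hmem' kv.1 (List.mem_cons_self ..) rfl
          have hLF : pvLF (kv.1 ++ t') = kv.2 ++ pvLF t' := by
            rw [pvLF, pvLF, htbl, List.foldl_append, List.foldl_append]
            rw [pv_chain prel kv.1 (fun kv' hkv' => by
              have hkv'T : kv' ∈ pvPosixTableL := htbl ▸ List.mem_append_left _ hkv'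
              refine ⟨(pv_tbl_ne kv' hkv'T).1, pvSep_of_B _ _ ?_⟩
              apply pv_tbl_keys_sep kv.1 hk1 kv'.1 (List.mem_map.mpr ⟨kv', hkv'T, rfl⟩)
              intro he
              exact hnotin (he ▸ List.mem_map.mpr ⟨kv', hkv', rfl⟩)) t']
            simp only [List.foldl_cons]
            rw [show pvRep (kv.1 ++ prel.foldl pvRep t') kv
                  = kv.2 ++ pvRep (prel.foldl pvRep t') kv from
                pv_replace_prefix kv.1 kv.2 _ (pv_tbl_ne kv hmem).1]
            rw [pv_chain post kv.2 (fun kv' hkv' => by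
              have hkv'T : kv' ∈ pvPosixTableL := htbl ▸
                (List.mem_append_right _ (List.mem_cons_of_mem _ hkv'))
              exact ⟨(pv_tbl_ne kv' hkv'T).1, pvSep_of_B _ _
                (pv_tbl_vals_sep kv hmem kv'.1 (List.mem_map.mpr ⟨kv', hkv'T, rfl⟩))⟩)]
          have hlen : t'.length ≤ n := by
            have h1 := pvPosixTableL_key_pos kv hmem
            have h2 : (kv.1 ++ t').length ≤ n + 1 := ht ▸ hcs
            simp only [List.length_append] at h2
            omega
          rw [← ht, hLF, List.drop_left, ih t' hlen]
        | none =>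
          rw [pvScan_cons_none c t hfi]
          have hnone : ∀ k ∈ pvKeys, ¬ k <+: c :: t := by
            intro k hk hpre
            obtain ⟨kv, hkv, rfl⟩ := List.mem_map.mp hk
            have := List.find?_eq_none.mp hfi kv hkv
            simp only [List.isPrefixOf_iff_prefix] at this
            exact this hpre
          rw [pvLF, pv_chainNone c pvPosixTableL (fun _ h => h) t hnone]
          have hlen : t.length ≤ n := by simp at hcs; omega
          rw [show pvPosixTableL.foldl pvRep t = pvLF t from rfl, ih t hlen]
  intro cs
  exact main cs.length cs (le_refl _)

theorem pv_fold_toList : ∀ (ps : List (String × String)) (s : String),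
    (ps.foldl (fun p kv => PySem.Str.replace p kv.1 kv.2) s).toList
      = (ps.map (fun kv => (kv.1.toList, kv.2.toList))).foldl pvRep s.toList := by
  intro ps
  induction ps with
  | nil => intro s; simp
  | cons kv ps ih =>
    intro s
    simp only [List.foldl_cons, List.map_cons]
    rw [ih, PySem.Str.toList_replace]
    rfl

theorem pv_tbl_same : pvPosixTable.map (fun kv => (kv.1.toList, kv.2.toList)) = pvPosixTableL := by
  decide

theorem pv_bridge (pattern : String) : (posix_to_re pattern).toList = pvLF pattern.toList := by
  rw [posix_to_re, pv_fold_toList, pv_tbl_same]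
  rfl

-- ===== VERDICT (by name: the statement is the Claim_ definition above) =====
theorem posix_to_re_spec : Claim_equal_posix_to_re := by
  intro pattern _
  unfold Spec_posix_to_re posix_to_re_alt
  apply String.toList_inj.mp
  rw [pv_bridge, String.toList_ofList, pv_main]
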